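-- pv_equiv track=rewrite | github.com/jakubro/knowledge_base | knowledge_base/utils.py | justify_table
-- ===== SOURCE A (Python) =====
-- from typing import List
--
-- def justify_table(table: List[list], fillchar=" ", separator="\t") -> str:
--     """:returns: String representation of the table with justified cells."""
--
--     table = [[str(col) for col in row] for row in table]
--
--     widths = []  # by columns
--     for row in table:
--         for i, col in enumerate(row):
--             len_ = len(col)
--             try:
--                 widths[i] = max(widths[i], len_)
--             except IndexError:
--                 widths.append(len_)
--
--     rv = ""
--     for row in table:
--         for i, col in enumerate(row):
--             rv += col.ljust(widths[i], fillchar) + separator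
--         rv += "\n"
--     return rv
-- ===== SOURCE B (Python) =====
-- from itertools import zip_longest
-- from typing import List
--
--
-- def justify_table(table: List[list], fillchar=" ", separator="\t") -> str:
--     """:returns: String representation of the table with justified cells."""
--
--     rows = [[str(col) for col in row] for row in table]
--     columns = zip_longest(*rows, fillvalue="")
--     widths = [max(len(cell) for cell in column) for column in columns]
--     return "".join(
--         "".join(cell.ljust(width, fillchar) + separator
--                 for cell, width in zip(row, widths)) + "\n"
--         for row in rows)
-- ===== Notes on version B (the rewrite author's own statement) =====
-- stated objective: idiomatic
-- what changed: Column widths are computed column-major by transposing with itertools.zip_longest(fillvalue='') and taking a max per column, replacing A's row-major mutate-or-append loop with try/except IndexError, and the output is built with join over comprehensions instead of string += accumulation.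
import Mathlib
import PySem

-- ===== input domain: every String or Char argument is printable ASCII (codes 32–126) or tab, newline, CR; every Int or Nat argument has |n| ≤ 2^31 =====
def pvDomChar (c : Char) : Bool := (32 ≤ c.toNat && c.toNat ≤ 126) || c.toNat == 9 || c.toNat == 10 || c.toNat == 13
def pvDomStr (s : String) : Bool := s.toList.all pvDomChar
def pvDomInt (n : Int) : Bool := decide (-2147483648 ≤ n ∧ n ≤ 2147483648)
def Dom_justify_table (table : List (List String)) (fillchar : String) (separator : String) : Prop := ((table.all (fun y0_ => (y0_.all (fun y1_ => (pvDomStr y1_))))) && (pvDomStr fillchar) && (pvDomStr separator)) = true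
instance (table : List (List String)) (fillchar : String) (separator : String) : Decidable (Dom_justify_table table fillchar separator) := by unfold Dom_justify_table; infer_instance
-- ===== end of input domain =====

-- B computes the column widths column-major (transpose with fill "" + max per column, as
-- itertools.zip_longest) and builds the output with join, instead of A's row-major
-- mutate-or-append widths loop and string += accumulation; same output, same cost (idiomatic).

-- ===== PORT A =====
-- str.ljust(width, fill) for a one-character fill; Python raises TypeError for any other
-- fill, and Pre_ excludes the inputs on which such a call happens. Both Pythons call
-- str.ljust, so both ports share this helper.
def pyLjust (s : String) (width : Nat) (fill : String) : String :=
  s ++ (List.replicate (width - s.toList.length) fill).foldl (· ++ ·) ""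

-- the `for i, col in enumerate(row)` widths loop: try widths[i] = max(widths[i], len_)
-- except IndexError: widths.append(len_)  (the except branch fires exactly when i = len widths)
def pvWidthsRowA (w : List Nat) (i : Nat) (row : List String) : List Nat :=
  match row with
  | [] => w
  | col :: rest =>
      pvWidthsRowA
        (if i < w.length then w.set i (max (w.getD i 0) (col.toList.length))
         else w ++ [col.toList.length])
        (i + 1) rest

-- the `for i, col in enumerate(row)` output loop accumulating rv
def pvRvRowA (widths : List Nat) (fillchar separator : String) (rv : String) (i : Nat)
    (row : List String) : String :=
  match row with
  | [] => rv
  | col :: rest =>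
      pvRvRowA widths fillchar separator
        (rv ++ pyLjust col (widths.getD i 0) fillchar ++ separator) (i + 1) rest

def justify_table (table : List (List String)) (fillchar : String) (separator : String) : String :=
  -- `str(col)` is the identity on strings, so the initial re-stringify is a no-op
  let widths := table.foldl (fun w row => pvWidthsRowA w 0 row) []
  table.foldl (fun rv row => pvRvRowA widths fillchar separator rv 0 row ++ "\n") ""

-- ===== PORT B =====
-- "".join(parts)
def pvStrJoin (parts : List String) : String := parts.foldl (· ++ ·) ""

def justify_table_alt (table : List (List String)) (fillchar : String) (separator : String) : String :=
  -- itertools.zip_longest(*rows, fillvalue=""): column i is [row[i] if i < len row else "" | row ∈ rows]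
  let numCols := table.foldl (fun m row => max m row.length) 0
  let columns := (List.range numCols).map (fun i => table.map (fun row => row.getD i ""))
  -- max(len(cell) for cell in column): every column is nonempty and lengths are ≥ 0, so = foldl max 0
  let widths := columns.map (fun column => (column.map (fun cell => cell.toList.length)).foldl max 0)
  pvStrJoin (table.map (fun row =>
    pvStrJoin ((row.zip widths).map (fun cw => pyLjust cw.1 cw.2 fillchar ++ separator)) ++ "\n"))

-- ===== PRECONDITION & SPEC =====
-- Pre_ excludes exactly the inputs on which Python A raises TypeError: str.ljust demands a
-- one-character fillchar, and ljust is called iff some row is nonempty.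
def Pre_justify_table (table : List (List String)) (fillchar : String) (separator : String) : Prop :=
  fillchar.toList.length = 1 ∨ ∀ row ∈ table, row = []
instance (table : List (List String)) (fillchar : String) (separator : String) : Decidable (Pre_justify_table table fillchar separator) := by unfold Pre_justify_table; infer_instance

def pvWitness_justify_table : List (List String) × String × String := ([["a", "bb"], ["ccc"]], " ", "\t")

def Spec_justify_table (table : List (List String)) (fillchar : String) (separator : String) (out : String) : Prop := out = justify_table_alt table fillchar separator
instance (table : List (List String)) (fillchar : String) (separator : String) (out : String) : Decidable (Spec_justify_table table fillchar separator out) := by unfold Spec_justify_table; infer_instance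

-- ===== CLAIM (what is proved, stated in full; the proofs are below) =====
def Claim_equal_justify_table : Prop := ∀ (table : List (List String)) (fillchar : String) (separator : String), Dom_justify_table table fillchar separator → Pre_justify_table table fillchar separator → Spec_justify_table table fillchar separator (justify_table table fillchar separator)

-- ===== LEMMAS AND PROOFS =====

-- pointwise merge of a widths list with one row's cell lengths (the effect of A's inner loop)
def pvMerge : List Nat → List String → List Nat
  | w, [] => w
  | [], c :: rest => c.toList.length :: pvMerge [] rest
  | m :: w, c :: rest => max m c.toList.length :: pvMerge w rest

theorem pvSet_take (w : List Nat) (i x : Nat) (h : i < w.length) :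
    (w.set i x).take (i+1) = w.take i ++ [x] := by
  rw [List.set_eq_take_append_cons_drop, if_pos h, List.take_append]
  simp [List.length_take, Nat.le_of_lt h]

theorem pvSet_drop (w : List Nat) (i x : Nat) (h : i < w.length) :
    (w.set i x).drop (i+1) = w.drop (i+1) := by
  rw [List.set_eq_take_append_cons_drop, if_pos h, List.drop_append]
  simp [List.length_take, Nat.le_of_lt h]

theorem pvWidthsRowA_eq (row : List String) : ∀ (w : List Nat) (i : Nat), i ≤ w.length →
    pvWidthsRowA w i row = w.take i ++ pvMerge (w.drop i) row := by
  induction row with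
  | nil => intro w i _; simp [pvWidthsRowA, pvMerge]
  | cons c rest ih =>
    intro w i h
    rcases Nat.lt_or_eq_of_le h with hlt | heq
    · rw [pvWidthsRowA, if_pos hlt,
        ih _ (i+1) (by simpa using hlt),
        pvSet_take _ _ _ hlt, pvSet_drop _ _ _ hlt,
        List.drop_eq_getElem_cons hlt, pvMerge,
        List.getD_eq_getElem _ _ hlt]
      simp
    · rw [pvWidthsRowA, if_neg (by omega),
        ih _ (i+1) (by simp; omega)]
      rw [List.take_of_length_le (by simp [← heq]),
        List.drop_of_length_le (by simp [← heq]),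
        List.take_of_length_le (by omega), List.drop_of_length_le (by omega)]
      simp [pvMerge]

theorem pvMerge_length : ∀ (w : List Nat) (row : List String),
    (pvMerge w row).length = max w.length row.length := by
  intro w row
  induction row generalizing w with
  | nil => simp [pvMerge]
  | cons c rest ih =>
    cases w with
    | nil => simp [pvMerge, ih]
    | cons m w => simp [pvMerge, ih]

theorem pvMerge_getD : ∀ (w : List Nat) (row : List String) (j : Nat),
    (pvMerge w row).getD j 0 = max (w.getD j 0) ((row.getD j "").toList.length) := by
  intro w row
  induction row generalizing w with
  | nil => intro j; simp [pvMerge]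
  | cons c rest ih =>
    intro j
    cases w with
    | nil => cases j with
      | zero => simp [pvMerge]
      | succ j => simpa [pvMerge] using ih [] j
    | cons m w => cases j with
      | zero => simp [pvMerge]
      | succ j => simpa [pvMerge] using ih w j

theorem pvFoldlMerge_length : ∀ (t : List (List String)) (w : List Nat),
    (t.foldl pvMerge w).length = t.foldl (fun m r => max m r.length) w.length := by
  intro t
  induction t with
  | nil => intro w; simp
  | cons r t ih => intro w; simp only [List.foldl_cons, ih, pvMerge_length]

theorem pvFoldlMerge_getD : ∀ (t : List (List String)) (w : List Nat) (j : Nat),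
    (t.foldl pvMerge w).getD j 0
      = t.foldl (fun m r => max m ((r.getD j "").toList.length)) (w.getD j 0) := by
  intro t
  induction t with
  | nil => intro w j; simp
  | cons r t ih => intro w j; simp only [List.foldl_cons, ih, pvMerge_getD]

theorem pvWidths_eq (t : List (List String)) :
    t.foldl (fun w row => pvWidthsRowA w 0 row) []
      = (List.range (t.foldl (fun m r => max m r.length) 0)).map
          (fun i => (t.map (fun r => (r.getD i "").toList.length)).foldl max 0) := by
  have h1 : (fun (w : List Nat) (row : List String) => pvWidthsRowA w 0 row) = pvMerge := by
    funext w row; simpa using pvWidthsRowA_eq row w 0 (Nat.zero_le _)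
  rw [h1]
  apply List.ext_getElem
  · simp [pvFoldlMerge_length]
  · intro j hj hj'
    rw [← List.getD_eq_getElem _ 0 hj, pvFoldlMerge_getD]
    simp [List.foldl_map]

theorem pvStrJoin_from (l : List String) : ∀ (a : String),
    l.foldl (· ++ ·) a = a ++ l.foldl (· ++ ·) "" := by
  induction l with
  | nil => intro a; simp
  | cons x l ih =>
    intro a
    simp only [List.foldl_cons]
    rw [ih (a ++ x), ih ("" ++ x), String.empty_append, String.append_assoc]

theorem pvStrJoin_cons (a : String) (l : List String) :
    pvStrJoin (a :: l) = a ++ pvStrJoin l := by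
  unfold pvStrJoin
  simp only [List.foldl_cons, String.empty_append]
  exact pvStrJoin_from l a

theorem pvRvRowA_eq (row : List String) : ∀ (widths : List Nat) (f s rv : String) (i : Nat),
    i + row.length ≤ widths.length →
    pvRvRowA widths f s rv i row
      = rv ++ pvStrJoin ((row.zip (widths.drop i)).map (fun cw => pyLjust cw.1 cw.2 f ++ s)) := by
  induction row with
  | nil => intro widths f s rv i _; simp [pvRvRowA, pvStrJoin]
  | cons c rest ih =>
    intro widths f s rv i h
    have hlt : i < widths.length := by simp at h; omega
    rw [pvRvRowA, ih _ _ _ _ (i+1) (by simp at h ⊢; omega),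
      List.drop_eq_getElem_cons hlt]
    simp only [List.zip_cons_cons, List.map_cons, pvStrJoin_cons,
      List.getD_eq_getElem _ _ hlt, String.append_assoc]

theorem pvOuter_eq (t : List (List String)) : ∀ (widths : List Nat) (f s rv : String),
    (∀ row ∈ t, row.length ≤ widths.length) →
    t.foldl (fun rv row => pvRvRowA widths f s rv 0 row ++ "\n") rv
      = rv ++ pvStrJoin (t.map (fun row =>
          pvStrJoin ((row.zip widths).map (fun cw => pyLjust cw.1 cw.2 f ++ s)) ++ "\n")) := by
  induction t with
  | nil => intro widths f s rv _; simp [pvStrJoin]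
  | cons r t ih =>
    intro widths f s rv hb
    simp only [List.foldl_cons, List.map_cons, pvStrJoin_cons]
    rw [ih widths f s _ (fun row hm => hb row (List.mem_cons_of_mem _ hm)),
      pvRvRowA_eq r widths f s rv 0 (by simpa using hb r List.mem_cons_self)]
    simp [String.append_assoc]

theorem pvRowLen_le (t : List (List String)) (r : List String) (hm : r ∈ t) :
    r.length ≤ t.foldl (fun m row => max m row.length) 0 := by
  have h := (PySem.List.le_foldl_max (t.map (fun row => row.length)) 0).2
      r.length (List.mem_map_of_mem hm)
  rwa [List.foldl_map] at h

-- ===== VERDICT (by name: the statement is the Claim_ definition above) =====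
theorem justify_table_spec : Claim_equal_justify_table := by
  intro table fillchar separator _ _
  unfold Spec_justify_table justify_table justify_table_alt
  rw [pvWidths_eq]
  rw [pvOuter_eq table _ fillchar separator ""
    (by intro r hm; simpa using pvRowLen_le table r hm)]
  simp [List.map_map, Function.comp_def]
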